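-- pv_equiv track=rewrite | github.com/rafibz007/AlgorithmsAndDataStructures | Exercises/KOLOSY-BIT/zad1-kolos2020.py | amount_of_once_n_multi
-- ===== SOURCE A (Python) =====
-- def amount_of_once_n_multi(number):
--     tab_number = [0]*10
--     if number == 0: tab_number[0] += 1
--     while number > 0:
--         tab_number[ number % 10 ] += 1
--         number //= 10
--
--     count_once = 0
--     count_multi = 0
--     for i in range(10):
--         if   tab_number[i] == 1: count_once += 1
--         elif tab_number[i] > 1: count_multi += 1
--
--     return count_once, count_multi
-- ===== SOURCE B (Python) =====
-- def amount_of_once_n_multi(number):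
--     digits = []
--     if number == 0:
--         digits.append(0)
--     while number > 0:
--         digits.append(number % 10)
--         number //= 10
--     digits = sorted(digits)
--     once, multi = 0, 0
--     while digits:
--         d = digits[0]
--         run = 0
--         while digits and digits[0] == d:
--             run += 1
--             digits = digits[1:]
--         if run == 1:
--             once += 1
--         else:
--             multi += 1
--     return once, multi
-- ===== Notes on version B (the rewrite author's own statement) =====
-- stated objective: alternative
-- what changed: Replaces the fixed 0-9 frequency table and the final scan over all ten counters by collecting the digits into a list, sorting it, and counting run-lengths of equal consecutive digits in one pass over the sorted list.
import Mathlib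
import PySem

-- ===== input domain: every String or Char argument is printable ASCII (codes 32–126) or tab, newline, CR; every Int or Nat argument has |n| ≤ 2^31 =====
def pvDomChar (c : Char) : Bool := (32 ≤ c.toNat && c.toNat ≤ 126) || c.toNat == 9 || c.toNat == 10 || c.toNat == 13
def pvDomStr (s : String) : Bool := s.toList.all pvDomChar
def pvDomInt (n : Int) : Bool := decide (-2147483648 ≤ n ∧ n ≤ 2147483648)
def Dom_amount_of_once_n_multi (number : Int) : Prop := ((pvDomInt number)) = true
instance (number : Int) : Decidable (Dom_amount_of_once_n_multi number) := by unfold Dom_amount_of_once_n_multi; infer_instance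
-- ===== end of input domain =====

-- B replaces A's fixed 0-9 frequency table by sort-then-count-runs over the collected digit list (objective: alternative).

-- ===== PORT A =====
-- the `while number > 0` loop: tab[number % 10] += 1; number //= 10
-- (the index number % 10 is in 0..9 here since number > 0, so .toNat is exact)
theorem pvFloordiv10_lt (n : Int) (h : n > 0) :
    (PySem.Int.floordiv n 10).toNat < n.toNat := by
  rw [PySem.Int.floordiv_eq_ediv_of_pos (by omega)]; omega

def pvTabLoop (number : Int) (tab : List Int) : List Int :=
  if h : number > 0 then
    pvTabLoop (PySem.Int.floordiv number 10)
      (tab.set (PySem.Int.mod number 10).toNat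
        (tab.getD (PySem.Int.mod number 10).toNat 0 + 1))
  else tab
termination_by number.toNat
decreasing_by exact pvFloordiv10_lt number h

def amount_of_once_n_multi (number : Int) : Int × Int :=
  let tab0 : List Int := List.replicate 10 0
  let tab1 := if number = 0 then tab0.set 0 (tab0.getD 0 0 + 1) else tab0
  let tab := pvTabLoop number tab1
  (List.range 10).foldl (fun cm i =>
    if tab.getD i 0 = 1 then (cm.1 + 1, cm.2)
    else if tab.getD i 0 > 1 then (cm.1, cm.2 + 1)
    else cm) (0, 0)

-- ===== PORT B =====
-- the same digit-extraction loop, appending to a list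
def pvDigitsLoop (number : Int) (digits : List Int) : List Int :=
  if h : number > 0 then
    pvDigitsLoop (PySem.Int.floordiv number 10) (digits ++ [PySem.Int.mod number 10])
  else digits
termination_by number.toNat
decreasing_by exact pvFloordiv10_lt number h

-- the inner `while digits and digits[0] == d` loop: (extra run length, remaining list)
def pvRunLen (d : Int) : List Int → Nat × List Int
  | [] => (0, [])
  | x :: rest =>
      if x = d then ((pvRunLen d rest).1 + 1, (pvRunLen d rest).2)
      else (0, x :: rest)

theorem pvRunLen_length (d : Int) (l : List Int) : (pvRunLen d l).2.length ≤ l.length := by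
  induction l with
  | nil => simp [pvRunLen]
  | cons x rest ih => by_cases h : x = d <;> simp [pvRunLen, h] <;> omega

-- the outer `while digits` loop of B
def pvGroupScan (l : List Int) (once multi : Int) : Int × Int :=
  match l with
  | [] => (once, multi)
  | x :: rest =>
      if (pvRunLen x rest).1 + 1 = 1 then pvGroupScan (pvRunLen x rest).2 (once + 1) multi
      else pvGroupScan (pvRunLen x rest).2 once (multi + 1)
termination_by l.length
decreasing_by
  all_goals simpa using Nat.lt_succ_of_le (pvRunLen_length x rest)

def amount_of_once_n_multi_alt (number : Int) : Int × Int :=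
  let digits0 : List Int := if number = 0 then [0] else []
  let ds := pvDigitsLoop number digits0
  pvGroupScan (PySem.List.sorted ds (fun x => x) false) 0 0

-- ===== PRECONDITION & SPEC =====
def Spec_amount_of_once_n_multi (number : Int) (out : Int × Int) : Prop := out = amount_of_once_n_multi_alt number
instance (number : Int) (out : Int × Int) : Decidable (Spec_amount_of_once_n_multi number out) := by unfold Spec_amount_of_once_n_multi; infer_instance

-- ===== CLAIM (what is proved, stated in full; the proofs are below) =====
def Claim_equal_amount_of_once_n_multi : Prop := ∀ (number : Int), Dom_amount_of_once_n_multi number → Spec_amount_of_once_n_multi number (amount_of_once_n_multi number)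

-- ===== LEMMAS AND PROOFS =====

-- the digit-increment step both loops share, as a fold step (proof-only)
def pvInc (tab : List Int) (d : Int) : List Int := tab.set d.toNat (tab.getD d.toNat 0 + 1)

-- the full digit list (zero-case prefix ++ extracted digits), proof-only
def pvDs (n : Int) : List Int := (if n = 0 then [(0:Int)] else []) ++ pvDigitsLoop n []

theorem digitsLoop_acc (n : Int) (acc : List Int) :
    pvDigitsLoop n acc = acc ++ pvDigitsLoop n [] := by
  by_cases h : n > 0
  · conv_lhs => rw [pvDigitsLoop]
    conv_rhs => rw [pvDigitsLoop]
    simp only [dif_pos h]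
    rw [digitsLoop_acc (PySem.Int.floordiv n 10) (acc ++ [PySem.Int.mod n 10]),
        digitsLoop_acc (PySem.Int.floordiv n 10) ([] ++ [PySem.Int.mod n 10])]
    simp
  · conv_lhs => rw [pvDigitsLoop]
    conv_rhs => rw [pvDigitsLoop]
    simp [h]
termination_by n.toNat
decreasing_by all_goals exact pvFloordiv10_lt n h

theorem digitsFrom_cons (n : Int) (h : n > 0) :
    pvDigitsLoop n [] = PySem.Int.mod n 10 :: pvDigitsLoop (PySem.Int.floordiv n 10) [] := by
  conv_lhs => rw [pvDigitsLoop]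
  simp only [dif_pos h, List.nil_append]
  rw [digitsLoop_acc]
  simp

theorem tabLoop_eq (n : Int) (tab : List Int) :
    pvTabLoop n tab = (pvDigitsLoop n []).foldl pvInc tab := by
  by_cases h : n > 0
  · conv_lhs => rw [pvTabLoop]
    rw [digitsFrom_cons n h]
    simp only [dif_pos h, List.foldl_cons]
    rw [tabLoop_eq]
    rfl
  · conv_lhs => rw [pvTabLoop]
    conv_rhs => rw [pvDigitsLoop]
    simp [h]
termination_by n.toNat
decreasing_by all_goals exact pvFloordiv10_lt n h

theorem digits_range (n : Int) : ∀ d ∈ pvDigitsLoop n [], 0 ≤ d ∧ d < 10 := by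
  intro d hd
  by_cases h : n > 0
  · rw [digitsFrom_cons n h] at hd
    rcases List.mem_cons.mp hd with h1 | h2
    · subst h1
      exact ⟨PySem.Int.mod_nonneg n (by omega), PySem.Int.mod_lt n (by omega)⟩
    · exact digits_range (PySem.Int.floordiv n 10) d h2
  · rw [pvDigitsLoop] at hd
    simp [h] at hd
termination_by n.toNat
decreasing_by all_goals exact pvFloordiv10_lt n h

theorem pvDs_range (n : Int) : ∀ d ∈ pvDs n, 0 ≤ d ∧ d < 10 := by
  intro d hd
  rcases List.mem_append.mp hd with h1 | h2
  · by_cases h : n = 0 <;> simp [h] at h1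
    omega
  · exact digits_range n d h2

theorem getD_set_eq (tab : List Int) (j i : Nat) (v : Int) (hj : j < tab.length) :
    (tab.set j v).getD i 0 = if i = j then v else tab.getD i 0 := by
  by_cases hij : i = j
  · subst hij; simp [List.getD, hj]
  · simp [List.getD, hij, Ne.symm hij]

theorem foldl_pvInc_getD (l : List Int) (tab : List Int) (hlen : tab.length = 10)
    (hl : ∀ d ∈ l, 0 ≤ d ∧ d < 10) (i : Nat) (hi : i < 10) :
    (l.foldl pvInc tab).getD i 0 = tab.getD i 0 + l.count (i : Int) := by
  induction l generalizing tab with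
  | nil => simp
  | cons d t ih =>
    obtain ⟨hd0, hd10⟩ := hl d (List.mem_cons_self ..)
    have hdn : d.toNat < tab.length := by omega
    rw [List.foldl_cons,
        ih (pvInc tab d) (by simp [pvInc, hlen]) (fun x hx => hl x (List.mem_cons_of_mem _ hx)),
        List.count_cons]
    simp only [pvInc]
    rw [getD_set_eq tab d.toNat i _ hdn]
    by_cases he : i = d.toNat
    · subst he
      have hv : (d == ((d.toNat : Nat) : Int)) = true := by simp; omega
      simp [hv]
      omega
    · have hv : (d == ((i : Nat) : Int)) = false := by simp; omega
      simp [he, hv]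

theorem countFold (tab : List Int) (l : List Nat) (o m : Int) :
    l.foldl (fun cm i =>
      if tab.getD i 0 = 1 then (cm.1 + 1, cm.2)
      else if tab.getD i 0 > 1 then (cm.1, cm.2 + 1)
      else cm) (o, m)
    = (o + l.countP (fun i => tab.getD i 0 == 1),
       m + l.countP (fun i => decide (tab.getD i 0 > 1))) := by
  induction l generalizing o m with
  | nil => simp
  | cons x t ih =>
    rw [List.foldl_cons, List.countP_cons, List.countP_cons]
    by_cases h1 : tab.getD x 0 = 1
    · have h2 : ¬ tab.getD x 0 > 1 := by omega
      have e1 : (tab.getD x 0 == 1) = true := beq_iff_eq.mpr h1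
      have e2 : decide (tab.getD x 0 > 1) = false := decide_eq_false h2
      rw [if_pos h1, ih, e1, e2]
      simp only [Prod.mk.injEq]
      constructor <;> push_cast <;> omega
    · by_cases h2 : tab.getD x 0 > 1
      · have e1 : (tab.getD x 0 == 1) = false := beq_eq_false_iff_ne.mpr h1
        have e2 : decide (tab.getD x 0 > 1) = true := decide_eq_true h2
        rw [if_neg h1, if_pos h2, ih, e1, e2]
        simp only [Prod.mk.injEq]
        constructor <;> push_cast <;> omega
      · have e1 : (tab.getD x 0 == 1) = false := beq_eq_false_iff_ne.mpr h1
        have e2 : decide (tab.getD x 0 > 1) = false := decide_eq_false h2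
        rw [if_neg h1, if_neg h2, ih, e1, e2]
        simp only [Prod.mk.injEq]
        constructor <;> push_cast <;> omega

theorem runLen_decomp (d : Int) (l : List Int) :
    l = List.replicate (pvRunLen d l).1 d ++ (pvRunLen d l).2 := by
  induction l with
  | nil => simp [pvRunLen]
  | cons x rest ih =>
    by_cases h : x = d
    · subst h
      simp only [pvRunLen, List.replicate_succ]
      exact congrArg (List.cons x) ih
    · simp [pvRunLen, h]

theorem runLen_head_ne (d : Int) (l : List Int) :
    ∀ y t, (pvRunLen d l).2 = y :: t → y ≠ d := by
  induction l with
  | nil => intro y t h; simp [pvRunLen] at h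
  | cons x rest ih =>
    intro y t h
    by_cases hx : x = d
    · subst hx
      simp only [pvRunLen] at h
      exact ih y t h
    · simp only [pvRunLen, if_neg hx] at h
      obtain ⟨h1, -⟩ := List.cons_eq_cons.mp h
      exact h1 ▸ hx

theorem run_rest_facts (d : Int) (rest : List Int)
    (hp : (d :: rest).Pairwise (· ≤ ·)) :
    (∀ z ∈ (pvRunLen d rest).2, d < z) ∧ (pvRunLen d rest).2.Pairwise (· ≤ ·) := by
  have hdec := runLen_decomp d rest
  have hrest : rest.Pairwise (· ≤ ·) := (List.pairwise_cons.mp hp).2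
  have hl' : (pvRunLen d rest).2.Pairwise (· ≤ ·) := by
    rw [hdec] at hrest; exact (List.pairwise_append.mp hrest).2.1
  refine ⟨?_, hl'⟩
  intro z hz
  cases hll : (pvRunLen d rest).2 with
  | nil => rw [hll] at hz; cases hz
  | cons y t =>
    have hy : y ≠ d := runLen_head_ne d rest y t hll
    have hmemy : y ∈ rest := by
      rw [hdec, hll]; exact List.mem_append_right _ (List.mem_cons_self ..)
    have hdy : d ≤ y := (List.pairwise_cons.mp hp).1 y hmemy
    have hdy' : d < y := lt_of_le_of_ne hdy (Ne.symm hy)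
    rw [hll] at hz hl'
    rcases List.mem_cons.mp hz with rfl | hzt
    · exact hdy'
    · have : y ≤ z := (List.pairwise_cons.mp hl').1 z hzt
      omega

theorem count_run_self (d : Int) (rest : List Int) (hp : (d :: rest).Pairwise (· ≤ ·)) :
    (d :: rest).count d = (pvRunLen d rest).1 + 1 := by
  have hne := (run_rest_facts d rest hp).1
  have h0 : (pvRunLen d rest).2.count d = 0 :=
    List.count_eq_zero.mpr (fun h => absurd (hne d h) (lt_irrefl d))
  rw [List.count_cons]
  conv_lhs => rw [runLen_decomp d rest]
  rw [List.count_append, List.count_replicate, h0]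
  simp

theorem count_run_other (d : Int) (rest : List Int) (i : Int) (hi : i ≠ d) :
    (d :: rest).count i = (pvRunLen d rest).2.count i := by
  rw [List.count_cons]
  conv_lhs => rw [runLen_decomp d rest]
  rw [List.count_append, List.count_replicate]
  simp [show ¬ d = i from fun h => hi h.symm]

theorem countP_update (l : List Nat) (hl : l.Nodup) (a : Nat) (ha : a ∈ l)
    (p q : Nat → Bool) (hpq : ∀ i ∈ l, i ≠ a → p i = q i) (hq : q a = false) :
    l.countP p = l.countP q + (if p a then 1 else 0) := by
  induction l with
  | nil => cases ha
  | cons x t ih =>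
    rw [List.countP_cons, List.countP_cons]
    rcases List.mem_cons.mp ha with rfl | hat
    · have hanott : a ∉ t := (List.nodup_cons.mp hl).1
      have heq : t.countP p = t.countP q :=
        List.countP_congr (fun i hi => by
          rw [hpq i (List.mem_cons_of_mem _ hi) (fun he => hanott (by rwa [he] at hi))])
      rw [heq, hq]
      by_cases hpa : p a = true <;> simp [hpa]
    · have hxa : x ≠ a := fun he => (List.nodup_cons.mp hl).1 (he ▸ hat)
      rw [hpq x (List.mem_cons_self ..) hxa,
          ih (List.nodup_cons.mp hl).2 hat
            (fun i hi hia => hpq i (List.mem_cons_of_mem _ hi) hia)]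
      omega

theorem groupScan_eq (s : List Int) (hs : s.Pairwise (· ≤ ·))
    (hr : ∀ d ∈ s, 0 ≤ d ∧ d < 10) (o m : Int) :
    pvGroupScan s o m
      = (o + (List.range 10).countP (fun (i : Nat) => s.count (i : Int) == 1),
         m + (List.range 10).countP (fun (i : Nat) => decide (s.count (i : Int) > 1))) := by
  match s with
  | [] => simp [pvGroupScan]
  | x :: rest =>
    have hdec := runLen_decomp x rest
    obtain ⟨hgt, hl'pw⟩ := run_rest_facts x rest hs
    have hsub : ∀ z ∈ (pvRunLen x rest).2, z ∈ x :: rest := by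
      intro z hz
      exact List.mem_cons_of_mem _ (by rw [hdec]; exact List.mem_append_right _ hz)
    have hr' : ∀ d ∈ (pvRunLen x rest).2, 0 ≤ d ∧ d < 10 := fun d hd => hr d (hsub d hd)
    have hx10 := hr x (List.mem_cons_self ..)
    have hxmem : x.toNat ∈ List.range 10 := List.mem_range.mpr (by omega)
    have hxTN : ((x.toNat : Nat) : Int) = x := Int.toNat_of_nonneg hx10.1
    have hx_l'zero : (pvRunLen x rest).2.count x = 0 :=
      List.count_eq_zero.mpr (fun h => absurd (hgt x h) (lt_irrefl x))
    have hcx := count_run_self x rest hs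
    have hcount_ne : ∀ i : Nat, i ∈ List.range 10 → i ≠ x.toNat →
        (x :: rest).count (i : Int) = (pvRunLen x rest).2.count (i : Int) := by
      intro i _ hne
      exact count_run_other x rest (i : Int) (by omega)
    have h1 : (List.range 10).countP (fun (i : Nat) => (x :: rest).count (i : Int) == 1)
        = (List.range 10).countP (fun (i : Nat) => (pvRunLen x rest).2.count (i : Int) == 1)
          + (if ((x :: rest).count x == 1 : Bool) then 1 else 0) := by
      have := countP_update (List.range 10) (List.nodup_range) x.toNat hxmem
        (fun (i : Nat) => (x :: rest).count (i : Int) == 1)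
        (fun (i : Nat) => (pvRunLen x rest).2.count (i : Int) == 1)
        (fun i hi hne => by simp only [hcount_ne i hi hne])
        (by simp [hxTN, hx_l'zero])
      simpa [hxTN] using this
    have h2 : (List.range 10).countP (fun (i : Nat) => decide ((x :: rest).count (i : Int) > 1))
        = (List.range 10).countP (fun (i : Nat) => decide ((pvRunLen x rest).2.count (i : Int) > 1))
          + (if (decide ((x :: rest).count x > 1) : Bool) then 1 else 0) := by
      have := countP_update (List.range 10) (List.nodup_range) x.toNat hxmem
        (fun (i : Nat) => decide ((x :: rest).count (i : Int) > 1))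
        (fun (i : Nat) => decide ((pvRunLen x rest).2.count (i : Int) > 1))
        (fun i hi hne => by simp only [hcount_ne i hi hne])
        (by simp [hxTN, hx_l'zero])
      simpa [hxTN] using this
    rw [pvGroupScan]
    by_cases hone : (pvRunLen x rest).1 + 1 = 1
    · rw [if_pos hone, groupScan_eq (pvRunLen x rest).2 hl'pw hr' (o + 1) m]
      rw [h1, h2, hcx]
      simp only [Prod.mk.injEq, beq_iff_eq, decide_eq_true_eq]
      split_ifs <;> omega
    · rw [if_neg hone, groupScan_eq (pvRunLen x rest).2 hl'pw hr' o (m + 1)]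
      rw [h1, h2, hcx]
      simp only [Prod.mk.injEq, beq_iff_eq, decide_eq_true_eq]
      split_ifs <;> omega
termination_by s.length
decreasing_by all_goals simpa using Nat.lt_succ_of_le (pvRunLen_length x rest)

theorem amount_eq (n : Int) : amount_of_once_n_multi n = amount_of_once_n_multi_alt n := by
  have hds_range := pvDs_range n
  have htab1 : (if n = 0 then (List.replicate 10 (0:Int)).set 0 ((List.replicate 10 (0:Int)).getD 0 0 + 1)
      else List.replicate 10 (0:Int))
      = (if n = 0 then [(0:Int)] else []).foldl pvInc (List.replicate 10 (0:Int)) := by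
    by_cases h : n = 0 <;> simp [h, pvInc]
  have htab : pvTabLoop n (if n = 0 then (List.replicate 10 (0:Int)).set 0 ((List.replicate 10 (0:Int)).getD 0 0 + 1)
      else List.replicate 10 (0:Int)) = (pvDs n).foldl pvInc (List.replicate 10 (0:Int)) := by
    rw [htab1, tabLoop_eq, pvDs, List.foldl_append]
  have hgetD : ∀ i : Nat, i < 10 →
      ((pvDs n).foldl pvInc (List.replicate 10 (0:Int))).getD i 0 = ((pvDs n).count (i : Int) : Int) := by
    intro i hi
    rw [foldl_pvInc_getD (pvDs n) _ (by simp) hds_range i hi,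
        List.getD_eq_getElem?_getD, List.getElem?_replicate]
    simp [hi]
  have hperm : (PySem.List.sorted (pvDs n) (fun x => x) false).Perm (pvDs n) :=
    PySem.List.sorted_perm ..
  have hpw : (PySem.List.sorted (pvDs n) (fun x => x) false).Pairwise (· ≤ ·) := by
    simpa using PySem.List.sorted_pairwise (pvDs n) (fun x => x)
  have hsr : ∀ d ∈ PySem.List.sorted (pvDs n) (fun x => x) false, 0 ≤ d ∧ d < 10 := by
    intro d hd
    exact hds_range d (hperm.mem_iff.mp hd)
  have hB : amount_of_once_n_multi_alt n
      = pvGroupScan (PySem.List.sorted (pvDs n) (fun x => x) false) 0 0 := by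
    show pvGroupScan (PySem.List.sorted (pvDigitsLoop n (if n = 0 then [0] else [])) (fun x => x) false) 0 0 = _
    rw [digitsLoop_acc n (if n = 0 then [0] else []), pvDs]
  rw [hB, groupScan_eq _ hpw hsr 0 0]
  show (List.range 10).foldl (fun cm i =>
      if (pvTabLoop n (if n = 0 then (List.replicate 10 (0:Int)).set 0 ((List.replicate 10 (0:Int)).getD 0 0 + 1)
            else List.replicate 10 (0:Int))).getD i 0 = 1 then (cm.1 + 1, cm.2)
      else if (pvTabLoop n (if n = 0 then (List.replicate 10 (0:Int)).set 0 ((List.replicate 10 (0:Int)).getD 0 0 + 1)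
            else List.replicate 10 (0:Int))).getD i 0 > 1 then (cm.1, cm.2 + 1)
      else cm) (0, 0) = _
  rw [htab, countFold]
  have hcnt : ∀ i : Int, (PySem.List.sorted (pvDs n) (fun x => x) false).count i = (pvDs n).count i :=
    fun i => hperm.count_eq i
  have hp1 : (List.range 10).countP (fun (i : Nat) => ((pvDs n).foldl pvInc (List.replicate 10 (0:Int))).getD i 0 == 1)
      = (List.range 10).countP (fun (i : Nat) => (PySem.List.sorted (pvDs n) (fun x => x) false).count (i : Int) == 1) := by
    apply List.countP_congr
    intro i hi
    rw [hgetD i (List.mem_range.mp hi), hcnt]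
    simp
  have hp2 : (List.range 10).countP (fun (i : Nat) => decide (((pvDs n).foldl pvInc (List.replicate 10 (0:Int))).getD i 0 > 1))
      = (List.range 10).countP (fun (i : Nat) => decide ((PySem.List.sorted (pvDs n) (fun x => x) false).count (i : Int) > 1)) := by
    apply List.countP_congr
    intro i hi
    rw [hgetD i (List.mem_range.mp hi), hcnt]
    simp
  rw [hp1, hp2]

-- ===== VERDICT (by name: the statement is the Claim_ definition above) =====
theorem amount_of_once_n_multi_spec : Claim_equal_amount_of_once_n_multi := by
  intro number _
  unfold Spec_amount_of_once_n_multi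
  exact amount_eq number
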